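-- pv_equiv track=rewrite | github.com/anhntb/UIT | IE221_KyThuatLapTrinhPython/Buoi3/module.py | tong_csc
-- ===== SOURCE A (Python) =====
-- def tong_csc(n, k):
--     if n < 0:
--         return 0
--     a, b = 0, 1
--     total = a
--     for _ in range(n):
--         total += b
--         a, b = b, a + b + k
--     return total
-- ===== SOURCE B (Python) =====
-- def tong_csc(n, k):
--     # Closed form via fast-doubling Fibonacci:
--     # f_i = F_i + k*(F_{i+1} - 1),  sum_{i=0}^{n} f_i = F_{n+2} - 1 + k*(F_{n+3} - n - 2)
--     if n < 0:
--         return 0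
--
--     def fib_pair(m):  # returns (F_m, F_{m+1}) by fast doubling
--         if m == 0:
--             return (0, 1)
--         a, b = fib_pair(m >> 1)
--         c = a * (2 * b - a)
--         d = a * a + b * b
--         if m & 1:
--             return (d, c + d)
--         return (c, d)
--
--     f2, f3 = fib_pair(n + 2)
--     return (f2 - 1) + k * (f3 - n - 2)
-- ===== Notes on version B (the rewrite author's own statement) =====
-- stated objective: faster
-- what changed: Replaced the O(n) loop over the inhomogeneous Fibonacci-like recurrence by a closed form (F_{n+2}-1 + k*(F_{n+3}-n-2)) computed with fast-doubling Fibonacci in O(log n).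
import Mathlib
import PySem

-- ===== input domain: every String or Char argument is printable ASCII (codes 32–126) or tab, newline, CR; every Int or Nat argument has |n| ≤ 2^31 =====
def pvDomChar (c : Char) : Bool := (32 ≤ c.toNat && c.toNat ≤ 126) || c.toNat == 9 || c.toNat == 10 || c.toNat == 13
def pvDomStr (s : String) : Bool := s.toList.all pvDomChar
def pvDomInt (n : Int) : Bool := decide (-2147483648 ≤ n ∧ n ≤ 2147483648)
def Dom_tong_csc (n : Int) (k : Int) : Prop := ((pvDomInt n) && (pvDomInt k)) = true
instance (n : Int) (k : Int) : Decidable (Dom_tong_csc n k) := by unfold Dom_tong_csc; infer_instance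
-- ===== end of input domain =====

-- B replaces A's O(n) loop by a closed form computed with fast-doubling Fibonacci (O(log n)).

-- ===== PORT A =====
-- literal port: state (a, b, total), one fold step per loop iteration of `for _ in range(n)`
def tong_csc (n : Int) (k : Int) : Int :=
  if n < 0 then 0
  else
    ((List.range n.toNat).foldl
      (fun (st : Int × Int × Int) _ => (st.2.1, st.1 + st.2.1 + k, st.2.2 + st.2.1))
      (0, 1, 0)).2.2

-- ===== PORT B =====
-- fast doubling: pvFibPair m = (F_m, F_{m+1})
def pvFibPair (m : Nat) : Int × Int :=
  if h : m = 0 then (0, 1)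
  else
    let p := pvFibPair (m / 2)
    let a := p.1
    let b := p.2
    let c := a * (2 * b - a)
    let d := a * a + b * b
    if m % 2 = 1 then (d, c + d) else (c, d)
termination_by m
decreasing_by exact Nat.div_lt_self (Nat.pos_of_ne_zero h) (by norm_num)

def tong_csc_alt (n : Int) (k : Int) : Int :=
  if n < 0 then 0
  else
    let p := pvFibPair (n.toNat + 2)
    (p.1 - 1) + k * (p.2 - n - 2)

-- ===== PRECONDITION & SPEC =====
def Spec_tong_csc (n : Int) (k : Int) (out : Int) : Prop := out = tong_csc_alt n k
instance (n : Int) (k : Int) (out : Int) : Decidable (Spec_tong_csc n k out) := by unfold Spec_tong_csc; infer_instance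

-- ===== CLAIM (what is proved, stated in full; the proofs are below) =====
def Claim_equal_tong_csc : Prop := ∀ (n : Int) (k : Int), Dom_tong_csc n k → Spec_tong_csc n k (tong_csc n k)

-- ===== LEMMAS AND PROOFS =====

theorem pv_fib_two_mul_int (h : Nat) :
    ((Nat.fib (2 * h) : Int)) = (Nat.fib h : Int) * (2 * (Nat.fib (h + 1) : Int) - (Nat.fib h : Int)) := by
  have hle : Nat.fib h ≤ 2 * Nat.fib (h + 1) := by
    have := Nat.fib_le_fib_succ (n := h)
    omega
  have := Nat.fib_two_mul h
  zify [hle] at this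
  linarith [this]

theorem pv_fib_two_mul_add_one_int (h : Nat) :
    ((Nat.fib (2 * h + 1) : Int)) = (Nat.fib (h + 1) : Int) ^ 2 + (Nat.fib h : Int) ^ 2 := by
  have := Nat.fib_two_mul_add_one h
  zify at this
  push_cast [this]
  ring

theorem pvFibPair_correct (m : Nat) :
    pvFibPair m = ((Nat.fib m : Int), (Nat.fib (m + 1) : Int)) := by
  induction m using Nat.strong_induction_on with
  | _ m ih =>
    rw [pvFibPair]
    by_cases h : m = 0
    · simp [h]
    · have hlt : m / 2 < m := Nat.div_lt_self (Nat.pos_of_ne_zero h) (by norm_num)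
      rw [ih (m / 2) hlt]
      simp only [h, dite_false]
      rcases Nat.even_or_odd m with he | ho
      · obtain ⟨t, ht⟩ := he
        have hm2 : m / 2 = t := by omega
        have hmod : ¬ (m % 2 = 1) := by omega
        have hmt : m = 2 * t := by omega
        subst hmt
        simp only [hmod, if_false, hm2]
        have h1 := pv_fib_two_mul_int t
        have h2 := pv_fib_two_mul_add_one_int t
        refine Prod.ext ?_ ?_
        · simpa using h1.symm
        · simp only
          rw [h2]
          ring
      · obtain ⟨t, ht⟩ := ho
        have hm2 : m / 2 = t := by omega
        have hmod : m % 2 = 1 := by omega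
        subst ht
        simp only [hmod, if_true, hm2]
        have h1 := pv_fib_two_mul_int t
        have h2 := pv_fib_two_mul_add_one_int t
        have h3 : 2 * t + 1 + 1 = 2 * (t + 1) := by ring
        have h4 := pv_fib_two_mul_int (t + 1)
        refine Prod.ext ?_ ?_
        · simp only
          rw [h2]; ring
        · simp only
          rw [h3, h4]
          have h5 : (Nat.fib (t + 1 + 1) : Int)
              = (Nat.fib t : Int) + (Nat.fib (t + 1) : Int) := by
            have := Nat.fib_add_two (n := t)
            zify at this
            linarith [this]
          rw [h5]
          ring

-- loop invariant for A: after m iterations the state is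
-- (F_m + k(F_{m+1}-1), F_{m+1} + k(F_{m+2}-1), F_{m+2}-1 + k(F_{m+3}-m-2))
theorem pv_loopA (k : Int) (m : Nat) :
    (List.range m).foldl
      (fun (st : Int × Int × Int) _ => (st.2.1, st.1 + st.2.1 + k, st.2.2 + st.2.1))
      (0, 1, 0)
    = ((Nat.fib m : Int) + k * ((Nat.fib (m + 1) : Int) - 1),
       ((Nat.fib (m + 1) : Int) + k * ((Nat.fib (m + 2) : Int) - 1),
        (Nat.fib (m + 2) : Int) - 1 + k * ((Nat.fib (m + 3) : Int) - (m : Int) - 2))) := by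
  induction m with
  | zero => simp [Nat.fib]
  | succ m ih =>
    rw [List.range_succ, List.foldl_append, ih]
    simp only [List.foldl_cons, List.foldl_nil]
    have hf : ∀ j : Nat, (Nat.fib (j + 2) : Int) = (Nat.fib j : Int) + (Nat.fib (j + 1) : Int) := by
      intro j
      have := Nat.fib_add_two (n := j)
      zify at this
      linarith [this]
    refine Prod.ext ?_ (Prod.ext ?_ ?_)
    · simp
    · simp only
      have h0 := hf m
      have h1 := hf (m + 1)
      simp only [show m + 1 + 2 = m + 3 from rfl, show m + 1 + 1 = m + 2 from rfl] at h1 ⊢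
      linear_combination -h0 - k * h1
    · simp only
      have h1 := hf (m + 1)
      have h2 := hf (m + 2)
      simp only [show m + 1 + 2 = m + 3 from rfl, show m + 2 + 2 = m + 4 from rfl] at h1 h2 ⊢
      push_cast
      linear_combination -h1 - k * h2

-- ===== VERDICT (by name: the statement is the Claim_ definition above) =====
theorem tong_csc_spec : Claim_equal_tong_csc := by
  intro n k _
  unfold Spec_tong_csc tong_csc tong_csc_alt
  by_cases hn : n < 0
  · simp [hn]
  · simp only [hn, if_false]
    rw [pv_loopA, pvFibPair_correct]
    simp only
    have hcast : ((n.toNat : Int)) = n := Int.toNat_of_nonneg (by omega)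
    have e2 : n.toNat + 2 + 1 = n.toNat + 3 := by omega
    rw [e2, hcast]
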